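-- pv_equiv track=rewrite | github.com/JulianMoreno2/inteligencia-artificial | sliding-puzzle/core/services/search_free_position.py | matrix_column
-- ===== SOURCE A (Python) =====
-- def matrix_column(matrix):
--     free_position_column = -1
--     for current_row in range(0, len(matrix)):
--         position = 0
--         for number in matrix[current_row]:
--             if number == '0':
--                 free_position_column = position
--                 break
--             position += 1
--     return free_position_column
-- ===== SOURCE B (Python) =====
-- def matrix_column(matrix):
--     for row in reversed(matrix):
--         if '0' in row:
--             return row.index('0')
--     return -1
-- ===== Notes on version B (the rewrite author's own statement) =====
-- stated objective: simpler
-- what changed: Replaces the full scan of all rows with a manual position counter and accumulator overwrite by a reverse traversal that early-returns the index of '0' in the last row containing it.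
import Mathlib
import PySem

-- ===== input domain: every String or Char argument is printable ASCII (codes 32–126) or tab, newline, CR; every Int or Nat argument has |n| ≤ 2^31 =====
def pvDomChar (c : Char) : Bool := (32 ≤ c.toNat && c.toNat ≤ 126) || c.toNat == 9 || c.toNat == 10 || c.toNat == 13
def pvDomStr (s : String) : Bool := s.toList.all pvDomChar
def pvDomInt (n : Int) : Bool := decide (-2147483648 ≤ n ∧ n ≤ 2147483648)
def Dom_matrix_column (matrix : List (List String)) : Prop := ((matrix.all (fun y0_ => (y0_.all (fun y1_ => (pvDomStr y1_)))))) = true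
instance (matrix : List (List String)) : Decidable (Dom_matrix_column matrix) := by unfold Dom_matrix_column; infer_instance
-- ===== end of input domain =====

-- B replaces A's full scan of all rows (manual position counter, accumulator overwrite, no outer break)
-- by a reverse traversal that early-returns the first-'0' index of the last row containing '0' (simpler).


-- ===== PORT A =====
-- inner 'for number in row' loop: position counter, break on '0' (returns position), else acc unchanged
def pvRowScan (row : List String) (position : Int) (acc : Int) : Int :=
  match row with
  | [] => acc
  | number :: rest => if number == "0" then position else pvRowScan rest (position + 1) acc

def matrix_column (matrix : List (List String)) : Int :=
  matrix.foldl (fun free_position_column current_row => pvRowScan current_row 0 free_position_column) (-1)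

-- ===== PORT B =====
-- for row in reversed(matrix): if '0' in row: return row.index('0');  return -1
def pvRevScan (rows : List (List String)) : Int :=
  match rows with
  | [] => -1
  | row :: rest =>
      if "0" ∈ row then ((PySem.List.index? row "0").getD 0 : Nat) else pvRevScan rest

def matrix_column_alt (matrix : List (List String)) : Int :=
  pvRevScan matrix.reverse

-- ===== PRECONDITION & SPEC =====
def Spec_matrix_column (matrix : List (List String)) (out : Int) : Prop := out = matrix_column_alt matrix
instance (matrix : List (List String)) (out : Int) : Decidable (Spec_matrix_column matrix out) := by unfold Spec_matrix_column; infer_instance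

-- ===== CLAIM (what is proved, stated in full; the proofs are below) =====
def Claim_equal_matrix_column : Prop := ∀ (matrix : List (List String)), Dom_matrix_column matrix → Spec_matrix_column matrix (matrix_column matrix)

-- ===== LEMMAS AND PROOFS =====

-- A's inner loop equals: if '0' in row then p + idxOf '0' else acc
theorem pvRowScan_eq (row : List String) (p acc : Int) :
    pvRowScan row p acc = if "0" ∈ row then p + ((PySem.List.index? row "0").getD 0 : Nat) else acc := by
  induction row generalizing p with
  | nil => simp [pvRowScan]
  | cons x rest ih =>
    by_cases hx : x = "0"
    · subst hx
      simp [pvRowScan, PySem.List.index?_cons_self]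
    · have hx' : (x == "0") = false := by simp [hx]
      simp only [pvRowScan, hx', Bool.false_eq_true, if_false, ih]
      rw [PySem.List.index?_cons_of_ne rest hx]
      by_cases hm : "0" ∈ rest
      · have hs : (PySem.List.index? rest "0").isSome = true := by
          simpa [PySem.List.index?_isSome_iff] using hm
        obtain ⟨k, hk⟩ := Option.isSome_iff_exists.mp hs
        rw [hk]
        simp only [PySem.List.index?_eq_idxOf?] at hk
        simp [hm, hk]
        push_cast
        ring
      · simp [hm, Ne.symm hx]

theorem foldl_eq_revScan (l : List (List String)) :
    l.foldl (fun acc row => pvRowScan row 0 acc) (-1) = pvRevScan l.reverse := by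
  induction l using List.reverseRecOn with
  | nil => simp [pvRevScan]
  | append_singleton l' r ih =>
    rw [List.foldl_append]
    simp only [List.foldl_cons, List.foldl_nil, List.reverse_append, List.reverse_singleton,
      List.singleton_append, pvRevScan]
    rw [pvRowScan_eq, ih]
    split <;> simp

-- ===== VERDICT (by name: the statement is the Claim_ definition above) =====
theorem matrix_column_spec : Claim_equal_matrix_column := by
  intro matrix _
  unfold Spec_matrix_column matrix_column matrix_column_alt
  exact foldl_eq_revScan matrix
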